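-- pv_equiv track=rewrite | github.com/shakeelakram00/DPFL-FPGA-Accel-Framework | DPFL-FPGA-Accel-Framework_CompPro/DPFL_FPGA_Accel34_Framework/DatasetSplitByUserAndEpoch.py | generate_epoch_indices
-- ===== SOURCE A (Python) =====
-- def generate_epoch_indices(epochs, E_samples_per_class, E_samples_per_user):
--     num_classes = 5
--     epoch_indices_rest = [i * E_samples_per_class for i in range(num_classes)]
--     user_epoch_indices = [[] for _ in range(epochs)]
--     # Generate indices for each epoch
--     for epoch in range(epochs):
--         epoch_start_index = epoch * E_samples_per_user
--
--         for class_num, start_index in enumerate(epoch_indices_rest):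
--             end_index = start_index + E_samples_per_user
--             user_epoch_indices[epoch].extend(list(range(start_index + epoch_start_index, end_index + epoch_start_index)))
--     return user_epoch_indices
-- ===== SOURCE B (Python) =====
-- def generate_epoch_indices(epochs, E_samples_per_class, E_samples_per_user):
--     if epochs <= 0:
--         return []
--     # Closed-form first row via divmod over one flat range, then incrementally
--     # shift the previous row by E_samples_per_user for each following epoch.
--     row = [(k // E_samples_per_user) * E_samples_per_class + k % E_samples_per_user
--            for k in range(5 * E_samples_per_user)]
--     out = []
--     for _ in range(epochs):
--         out.append(row)
--         row = [x + E_samples_per_user for x in row]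
--     return out
-- ===== Notes on version B (the rewrite author's own statement) =====
-- stated objective: alternative
-- what changed: B computes the first epoch's row in closed form with divmod over a single flat range (no per-class loop) and then derives each subsequent epoch's row incrementally by shifting the previous row, instead of A's per-epoch regeneration of five class ranges into preallocated rows.
import Mathlib
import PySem

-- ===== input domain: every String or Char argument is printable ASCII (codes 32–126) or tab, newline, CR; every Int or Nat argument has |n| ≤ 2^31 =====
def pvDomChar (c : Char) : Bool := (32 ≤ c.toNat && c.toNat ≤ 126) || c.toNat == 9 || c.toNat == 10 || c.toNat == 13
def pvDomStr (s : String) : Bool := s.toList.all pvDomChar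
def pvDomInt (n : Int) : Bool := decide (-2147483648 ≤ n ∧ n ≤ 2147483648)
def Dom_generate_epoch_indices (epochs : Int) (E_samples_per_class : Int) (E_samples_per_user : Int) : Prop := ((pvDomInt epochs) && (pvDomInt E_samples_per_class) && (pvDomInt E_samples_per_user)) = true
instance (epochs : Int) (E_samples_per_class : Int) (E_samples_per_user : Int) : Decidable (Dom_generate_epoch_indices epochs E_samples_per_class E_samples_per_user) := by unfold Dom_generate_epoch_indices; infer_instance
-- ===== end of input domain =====

-- B computes the first row in closed form with divmod over one flat range and derives each later
-- epoch's row by shifting the previous one, instead of A's per-epoch per-class range extends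
-- into preallocated rows (objective: alternative).

-- ===== PORT A =====
-- literal port of A: preallocated sequence of empty rows, mutated in place per epoch
-- (Python's mutable list-of-lists is ported as an Array so in-place writes stay O(1))
def generate_epoch_indices (epochs : Int) (E_samples_per_class : Int) (E_samples_per_user : Int) : List (List Int) :=
  let num_classes : Int := 5
  let epoch_indices_rest : List Int :=
    (PySem.List.pyRange 0 num_classes 1).map (fun i => i * E_samples_per_class)
  let user_epoch_indices : Array (List Int) :=
    (PySem.List.pyRange 0 epochs 1).foldl (fun a _ => a.push ([] : List Int)) #[]
  ((PySem.List.pyRange 0 epochs 1).foldl (fun uei epoch =>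
      let epoch_start_index := epoch * E_samples_per_user
      let row := epoch_indices_rest.foldl (fun r start_index =>
          let end_index := start_index + E_samples_per_user
          r ++ PySem.List.pyRange (start_index + epoch_start_index) (end_index + epoch_start_index) 1)
        (uei.getD epoch.toNat [])
      uei.setIfInBounds epoch.toNat row)
    user_epoch_indices).toList

-- ===== PORT B =====
-- B: one flat divmod comprehension for the first row, then a loop that appends the current
-- row and shifts it by E_samples_per_user for the next epoch
def generate_epoch_indices_alt (epochs : Int) (E_samples_per_class : Int) (E_samples_per_user : Int) : List (List Int) :=
  if epochs ≤ 0 then []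
  else
  let row0 : List Int :=
    (PySem.List.pyRange 0 (5 * E_samples_per_user) 1).map (fun k =>
      (PySem.Int.floordiv k E_samples_per_user) * E_samples_per_class +
        PySem.Int.mod k E_samples_per_user)
  ((PySem.List.pyRange 0 epochs 1).foldl
      (fun (st : List (List Int) × List Int) _ =>
        (st.1 ++ [st.2], st.2.map (fun x => x + E_samples_per_user)))
      (([] : List (List Int)), row0)).1

-- ===== PRECONDITION & SPEC =====
def Spec_generate_epoch_indices (epochs : Int) (E_samples_per_class : Int) (E_samples_per_user : Int) (out : List (List Int)) : Prop := out = generate_epoch_indices_alt epochs E_samples_per_class E_samples_per_user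
instance (epochs : Int) (E_samples_per_class : Int) (E_samples_per_user : Int) (out : List (List Int)) : Decidable (Spec_generate_epoch_indices epochs E_samples_per_class E_samples_per_user out) := by unfold Spec_generate_epoch_indices; infer_instance

-- ===== CLAIM (what is proved, stated in full; the proofs are below) =====
def Claim_equal_generate_epoch_indices : Prop := ∀ (epochs : Int) (E_samples_per_class : Int) (E_samples_per_user : Int), Dom_generate_epoch_indices epochs E_samples_per_class E_samples_per_user → Spec_generate_epoch_indices epochs E_samples_per_class E_samples_per_user (generate_epoch_indices epochs E_samples_per_class E_samples_per_user)

-- ===== LEMMAS AND PROOFS =====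

-- Array.getD agrees with List.getD on toList
theorem pv_array_getD {α : Type} (a : Array α) (i : Nat) (d : α) :
    a.getD i d = a.toList.getD i d := by
  simp [Array.getD, List.getD_eq_getElem?_getD]
  split <;> simp_all

-- a foldl over arrays projects to a foldl over lists
theorem pv_toList_foldl {α β : Type} (l : List β) (f : Array α → β → Array α)
    (g : List α → β → List α) (h : ∀ a x, (f a x).toList = g a.toList x) :
    ∀ a : Array α, (l.foldl f a).toList = l.foldl g a.toList := by
  induction l with
  | nil => intro a; rfl
  | cons x xs ih => intro a; simp only [List.foldl_cons]; rw [ih, h]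

-- pushing one empty row per element builds the all-empty row list
theorem pv_push_empty (l : List Int) :
    ((l.foldl (fun (a : Array (List Int)) _ => a.push ([] : List Int)) #[])).toList
      = l.map (fun _ => ([] : List Int)) := by
  have h := pv_toList_foldl l (fun (a : Array (List Int)) _ => a.push ([] : List Int))
    (fun la _ => la ++ [([] : List Int)]) (fun a _ => Array.toList_push ..) #[]
  rw [h, PySem.List.foldl_append_eq_flatMap]
  induction l with
  | nil => rfl
  | cons x xs ih => simp_all

-- a shifted unit-step range is the mapped range
theorem pv_pyRange_shift (a d : Int) (n : Int) :
    PySem.List.pyRange (a + d) (a + n + d) 1 = (PySem.List.pyRange 0 n 1).map (fun j => a + j + d) := by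
  rw [PySem.List.pyRange_one, PySem.List.pyRange_one]
  have h : (a + n + d - (a + d)).toNat = (n - 0).toNat := by omega
  rw [h, List.map_map]
  apply List.map_congr_left
  intro k _
  simp; ring

-- the inner per-class fold appends one row that equals the shifted base row
theorem pv_row_eq (Ec Eu e : Int) (r0 : List Int) :
    (((PySem.List.pyRange 0 5 1).map (fun i => i * Ec)).foldl (fun r s =>
        r ++ PySem.List.pyRange (s + e * Eu) (s + Eu + e * Eu) 1) r0)
    = r0 ++ ((PySem.List.pyRange 0 5 1).flatMap (fun c =>
        (PySem.List.pyRange 0 Eu 1).map (fun j => c * Ec + j))).map (fun b => b + e * Eu) := by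
  rw [List.foldl_map, PySem.List.foldl_append_eq_flatMap]
  congr 1
  rw [List.map_flatMap, List.flatMap_congr]
  intro c _
  rw [List.map_map]
  have := pv_pyRange_shift (c * Ec) (e * Eu) Eu
  calc PySem.List.pyRange (c * Ec + e * Eu) (c * Ec + Eu + e * Eu) 1
      = (PySem.List.pyRange 0 Eu 1).map (fun j => c * Ec + j + e * Eu) := this
    _ = _ := by apply List.map_congr_left; intro j _; rfl

-- the set-based fold over indices [0, n) starting from n empty rows computes the map of f
theorem pv_fold_set (f : Int → List Int) : ∀ (n : Nat) (t : List (List Int)),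
    (PySem.List.pyRange 0 (n : Int) 1).foldl (fun uei epoch =>
        uei.set epoch.toNat ((uei.getD epoch.toNat []) ++ f epoch))
      (((PySem.List.pyRange 0 (n : Int) 1).map (fun _ => ([] : List Int))) ++ t)
    = ((PySem.List.pyRange 0 (n : Int) 1).map f) ++ t := by
  intro n
  induction n with
  | zero => intro t; simp [PySem.List.pyRange_one_eq_nil]
  | succ m ih =>
    intro t
    have hsplit : PySem.List.pyRange 0 ((m : Int) + 1) 1
        = PySem.List.pyRange 0 (m : Int) 1 ++ [(m : Int)] := by
      exact PySem.List.pyRange_one_succ_right (by exact_mod_cast Nat.zero_le m)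
    have hcast : ((m + 1 : Nat) : Int) = (m : Int) + 1 := by push_cast; ring
    rw [hcast, hsplit]
    rw [List.map_append, List.foldl_append, List.append_assoc]
    simp only [List.map_cons, List.map_nil, List.singleton_append]
    rw [ih (([] : List Int) :: t)]
    have hlen : ((PySem.List.pyRange 0 (m : Int) 1).map f).length = m := by
      rw [List.length_map, PySem.List.length_pyRange_one]; omega
    simp only [List.foldl_cons, List.foldl_nil]
    have htn : ((m : Int)).toNat = m := by omega
    rw [htn]
    rw [List.getD_eq_getElem?_getD, List.getElem?_append_right (by omega : ((PySem.List.pyRange 0 (m : Int) 1).map f).length ≤ m)]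
    rw [hlen]
    simp only [Nat.sub_self, List.getElem?_cons_zero, Option.getD_some, List.nil_append]
    rw [List.set_append_right _ _ (by omega)]
    rw [hlen, Nat.sub_self]
    simp [List.map_append]

-- A equals the canonical "map of shifted base rows" form
theorem pv_A_eq_map (epochs Ec Eu : Int) :
    generate_epoch_indices epochs Ec Eu
    = (PySem.List.pyRange 0 epochs 1).map (fun e =>
        (((PySem.List.pyRange 0 5 1).flatMap (fun c =>
          (PySem.List.pyRange 0 Eu 1).map (fun j => c * Ec + j))).map (fun b => b + e * Eu))) := by
  simp only [generate_epoch_indices]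
  rw [pv_toList_foldl (PySem.List.pyRange 0 epochs 1) _
        (fun (uei : List (List Int)) epoch =>
          uei.set epoch.toNat
            ((((PySem.List.pyRange 0 5 1).map (fun i => i * Ec)).foldl (fun r start_index =>
                r ++ PySem.List.pyRange (start_index + epoch * Eu) (start_index + Eu + epoch * Eu) 1)
              (uei.getD epoch.toNat []))))
        (by intro a x; simp only [Array.toList_setIfInBounds, pv_array_getD])]
  rw [pv_push_empty]
  have he : PySem.List.pyRange 0 epochs 1 = PySem.List.pyRange 0 ((epochs.toNat : Nat) : Int) 1 := by
    rcases le_or_gt epochs 0 with h | h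
    · rw [PySem.List.pyRange_one_eq_nil h, PySem.List.pyRange_one_eq_nil (by omega)]
    · congr 1; omega
  rw [he]
  have := pv_fold_set (fun epoch =>
      ((PySem.List.pyRange 0 5 1).flatMap (fun c =>
        (PySem.List.pyRange 0 Eu 1).map (fun j => c * Ec + j))).map (fun b => b + epoch * Eu))
    epochs.toNat []
  rw [List.append_nil, List.append_nil] at this
  rw [← this]
  apply PySem.List.foldl_congr_mem
  intro uei epoch _
  congr 1
  have := pv_row_eq Ec Eu epoch (uei.getD epoch.toNat [])
  convert this using 3

-- B's divmod row equals the flatMap base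
theorem pv_row0_eq (Ec Eu : Int) :
    (PySem.List.pyRange 0 (5 * Eu) 1).map (fun k =>
        (PySem.Int.floordiv k Eu) * Ec + PySem.Int.mod k Eu)
    = (PySem.List.pyRange 0 5 1).flatMap (fun c =>
        (PySem.List.pyRange 0 Eu 1).map (fun j => c * Ec + j)) := by
  rcases le_or_gt Eu 0 with h | h
  · rw [PySem.List.pyRange_one_eq_nil (by omega : 5 * Eu ≤ 0)]
    have : ∀ c : Int, (PySem.List.pyRange 0 Eu 1).map (fun j => c * Ec + j) = [] := by
      intro c; rw [PySem.List.pyRange_one_eq_nil (by omega)]; rfl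
    simp [List.flatMap, this]
  · -- Eu > 0: split the flat range at the five class boundaries
    have hsplit : ∀ m : Nat, PySem.List.pyRange 0 ((m : Int) * Eu) 1
        = (PySem.List.pyRange 0 (m : Int) 1).flatMap (fun i =>
            PySem.List.pyRange (i * Eu) (i * Eu + Eu) 1) := by
      intro m
      induction m with
      | zero => simp [PySem.List.pyRange_one_eq_nil]
      | succ p ih =>
        have hc : (((p : Nat) + 1 : Nat) : Int) = (p : Int) + 1 := by push_cast; ring
        rw [hc, PySem.List.pyRange_one_succ_right (by exact_mod_cast Nat.zero_le p),
            List.flatMap_append]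
        have hsp : PySem.List.pyRange 0 (((p : Int) + 1) * Eu) 1
            = PySem.List.pyRange 0 ((p : Int) * Eu) 1
              ++ PySem.List.pyRange ((p : Int) * Eu) (((p : Int) + 1) * Eu) 1 := by
          apply PySem.List.pyRange_one_append
          · positivity
          · nlinarith
        rw [hsp, ih]
        simp [List.flatMap]; ring_nf
    have h5 : (5 : Int) = ((5 : Nat) : Int) := by norm_num
    rw [show (5 : Int) * Eu = ((5 : Nat) : Int) * Eu by norm_num, hsplit 5, List.map_flatMap]
    rw [h5]
    apply List.flatMap_congr
    intro c hc
    rw [PySem.List.mem_pyRange_one] at hc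
    have hsh : PySem.List.pyRange (c * Eu) (c * Eu + Eu) 1
        = (PySem.List.pyRange 0 Eu 1).map (fun j => c * Eu + j) := by
      have := pv_pyRange_shift (c * Eu) 0 Eu
      simpa using this
    rw [hsh, List.map_map]
    apply List.map_congr_left
    intro j hj
    rw [PySem.List.mem_pyRange_one] at hj
    simp only [Function.comp]
    have hfd : PySem.Int.floordiv (c * Eu + j) Eu = c := by
      rw [PySem.Int.floordiv_eq_iff_of_pos h]
      constructor
      · omega
      · nlinarith [hj.1, hj.2]
    have hmd : PySem.Int.mod (c * Eu + j) Eu = j := by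
      have hfm := PySem.Int.floordiv_mul_add_mod (c * Eu + j) Eu
      rw [hfd] at hfm
      omega
    rw [hfd, hmd]

-- the append-and-shift fold produces the map of shifted rows
theorem pv_fold_shift (Eu : Int) : ∀ (l : List Int) (r : List Int) (acc : List (List Int)),
    (l.foldl (fun (st : List (List Int) × List Int) _ =>
        (st.1 ++ [st.2], st.2.map (fun x => x + Eu))) (acc, r))
    = (acc ++ (List.range l.length).map (fun (t : Nat) => r.map (fun x => x + (t : Int) * Eu)),
       r.map (fun x => x + (l.length : Int) * Eu)) := by
  intro l
  induction l with
  | nil => intro r acc; simp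
  | cons y ys ih =>
    intro r acc
    simp only [List.foldl_cons]
    rw [ih (r.map (fun x => x + Eu))]
    simp only [Prod.mk.injEq]
    constructor
    · rw [List.length_cons, List.range_succ_eq_map, List.map_cons, List.map_map]
      simp only [List.append_assoc, List.singleton_append]
      congr 1
      congr 1
      · apply Eq.symm
        calc r.map (fun x => x + ((0 : Nat) : Int) * Eu) = r.map id := by
              apply List.map_congr_left; intro x _; simp
          _ = r := List.map_id r
      · apply List.map_congr_left
        intro t _
        rw [List.map_map]
        apply List.map_congr_left
        intro x _
        simp only [Function.comp]
        push_cast; ring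
    · rw [List.map_map]
      apply List.map_congr_left
      intro x _
      simp only [Function.comp, List.length_cons]
      push_cast; ring

-- ===== VERDICT (by name: the statement is the Claim_ definition above) =====
theorem generate_epoch_indices_spec : Claim_equal_generate_epoch_indices := by
  intro epochs Ec Eu _
  unfold Spec_generate_epoch_indices
  rw [pv_A_eq_map]
  by_cases h0 : epochs ≤ 0
  · simp [generate_epoch_indices_alt, h0, PySem.List.pyRange_one_eq_nil h0]
  simp only [generate_epoch_indices_alt, if_neg h0]
  rw [pv_row0_eq Ec Eu, pv_fold_shift]
  dsimp only
  rw [List.nil_append]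
  conv_rhs => rw [PySem.List.length_pyRange_one]
  rw [PySem.List.pyRange_one 0 epochs]
  rw [List.map_map]
  apply List.map_congr_left
  intro k _
  simp only [Function.comp]
  apply List.map_congr_left
  intro b _
  ring_nf
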